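-- pv_equiv track=rewrite | github.com/CCAgentOrg/picorouter | picorouter/models.py | generate_config_from_models
-- ===== SOURCE A (Python) =====
-- def generate_config_from_models(models: list) -> str:
--     """Generate YAML config from models."""
--     if not models:
--         return "# No models available"
--
--     lines = ["# PicoRouter config generated from models.dev", "", "profiles:"]
--
--     # Group by provider
--     by_provider = {}
--     for m in models:
--         prov = m.get("provider", "unknown")
--         if prov not in by_provider:
--             by_provider[prov] = []
--         by_provider[prov].append(m.get("model", ""))
--
--     # Generate profile for each provider
--     for prov, model_list in sorted(by_provider.items()):
--         prov_key = prov.lower().replace(".", "").replace(" ", "")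
--         lines.append(f"  {prov_key}:")
--         lines.append(f"    cloud:")
--         lines.append(f"      providers:")
--         lines.append(f"        {prov}:")
--         lines.append(f"          models:")
--         for model in model_list[:3]:  # Max 3 models per provider
--             lines.append(f"            - {model}")
--
--     lines.append("")
--     lines.append("default_profile: chat")
--
--     return "\n".join(lines)
-- ===== SOURCE B (Python) =====
-- def generate_config_from_models(models: list) -> str:
--     """Generate YAML config from models."""
--     if not models:
--         return "# No models available"
--
--     lines = ["# PicoRouter config generated from models.dev", "", "profiles:"]
--
--     # No grouping dict: sort the distinct providers, then scan models once per provider.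
--     for prov in sorted({m.get("provider", "unknown") for m in models}):
--         prov_key = prov.lower().replace(".", "").replace(" ", "")
--         lines += [f"  {prov_key}:", "    cloud:", "      providers:",
--                   f"        {prov}:", "          models:"]
--         for model in [m.get("model", "") for m in models
--                       if m.get("provider", "unknown") == prov][:3]:
--             lines.append(f"            - {model}")
--
--     lines += ["", "default_profile: chat"]
--     return "\n".join(lines)
-- ===== Notes on version B (the rewrite author's own statement) =====
-- stated objective: alternative
-- what changed: Replaces A's grouping dict plus sorted(items) with sorting the distinct providers and filtering the model list once per provider (no dict at all).
import Mathlib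
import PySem

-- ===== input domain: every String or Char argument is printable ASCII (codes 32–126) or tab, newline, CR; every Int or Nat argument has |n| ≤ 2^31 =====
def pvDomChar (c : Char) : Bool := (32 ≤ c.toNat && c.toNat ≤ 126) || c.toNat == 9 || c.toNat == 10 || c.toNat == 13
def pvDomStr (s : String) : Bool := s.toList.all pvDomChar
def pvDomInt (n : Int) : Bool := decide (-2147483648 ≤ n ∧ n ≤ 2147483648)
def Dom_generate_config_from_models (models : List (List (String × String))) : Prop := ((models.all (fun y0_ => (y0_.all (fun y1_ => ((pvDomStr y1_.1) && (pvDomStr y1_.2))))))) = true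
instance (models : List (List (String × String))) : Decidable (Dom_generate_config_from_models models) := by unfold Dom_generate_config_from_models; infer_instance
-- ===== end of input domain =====

-- B replaces A's dict-bucketing pass by sorting the distinct providers and scanning the
-- model list once per provider (no grouping dict); objective: alternative (same results, not faster).

-- ===== PORT A =====
def generate_config_from_models (models : List (List (String × String))) : String :=
  if models = [] then "# No models available"
  else
    let lines : List String := ["# PicoRouter config generated from models.dev", "", "profiles:"]
    -- Group by provider
    let by_provider : PySem.Dict String (List String) :=
      models.foldl (fun d m =>
        let prov := (PySem.Dict.mk m).getD "provider" "unknown"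
        let d := if d.contains prov = false then d.insert prov ([] : List String) else d
        -- by_provider[prov].append(…): the key is present here, so modify's [] default is never used
        d.modify prov [] (fun l => l ++ [(PySem.Dict.mk m).getD "model" ""]))
        PySem.Dict.empty
    -- sorted(by_provider.items()) compares the (str, list) tuples: sorted2 with both components
    let lines := (PySem.List.sorted2 by_provider.items (fun p => p.1) (fun p => p.2)).foldl
      (fun lines pm =>
        let prov := pm.1
        let prov_key := PySem.Str.replace (PySem.Str.replace (PySem.Str.lower prov) "." "") " " ""
        let lines := lines ++ ["  " ++ prov_key ++ ":", "    cloud:", "      providers:",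
                               "        " ++ prov ++ ":", "          models:"]
        (PySem.List.slice pm.2 none (some 3)).foldl
          (fun lines model => lines ++ ["            - " ++ model]) lines)
      lines
    let lines := lines ++ [""]
    let lines := lines ++ ["default_profile: chat"]
    PySem.Str.join "\n" lines

-- ===== PORT B =====
def generate_config_from_models_alt (models : List (List (String × String))) : String :=
  if models = [] then "# No models available"
  else
    let lines : List String := ["# PicoRouter config generated from models.dev", "", "profiles:"]
    -- sorted({m.get("provider","unknown") for m in models})
    let lines := (PySem.List.sorted
        (PySem.Set.ofList (models.map (fun m => (PySem.Dict.mk m).getD "provider" "unknown")))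
        (fun p => p)).foldl
      (fun lines prov =>
        let prov_key := PySem.Str.replace (PySem.Str.replace (PySem.Str.lower prov) "." "") " " ""
        let lines := lines ++ ["  " ++ prov_key ++ ":", "    cloud:", "      providers:",
                               "        " ++ prov ++ ":", "          models:"]
        -- [m.get("model","") for m in models if m.get("provider","unknown") == prov][:3]
        (PySem.List.slice ((models.filter
              (fun m => (PySem.Dict.mk m).getD "provider" "unknown" == prov)).map
              (fun m => (PySem.Dict.mk m).getD "model" "")) none (some 3)).foldl
          (fun lines model => lines ++ ["            - " ++ model]) lines)
      lines
    PySem.Str.join "\n" (lines ++ ["", "default_profile: chat"])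

-- ===== PRECONDITION & SPEC =====
def Spec_generate_config_from_models (models : List (List (String × String))) (out : String) : Prop := out = generate_config_from_models_alt models
instance (models : List (List (String × String))) (out : String) : Decidable (Spec_generate_config_from_models models out) := by unfold Spec_generate_config_from_models; infer_instance

-- ===== CLAIM (what is proved, stated in full; the proofs are below) =====
def Claim_equal_generate_config_from_models : Prop := ∀ (models : List (List (String × String))), Dom_generate_config_from_models models → Spec_generate_config_from_models models (generate_config_from_models models)

-- ===== LEMMAS AND PROOFS =====

-- the provider / model lookups
def pvKey (m : List (String × String)) : String := (PySem.Dict.mk m).getD "provider" "unknown"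
def pvVal (m : List (String × String)) : String := (PySem.Dict.mk m).getD "model" ""

-- A's guarded "insert-[] then append" step is a plain modify-append step
lemma pv_step_eq (d : PySem.Dict String (List String)) (k v : String) :
    (if d.contains k = false then d.insert k ([] : List String) else d).modify k []
      (fun l => l ++ [v]) = d.modify k [] (fun l => l ++ [v]) := by
  by_cases h : d.contains k = false
  · simp only [h, if_true, PySem.Dict.modify, PySem.Dict.getD_insert_self,
      PySem.Dict.insert_insert_self, PySem.Dict.getD_of_not_contains d ([] : List String) h]
  · simp [h]

-- insertBy with two comparators agreeing against the accumulator
lemma pv_insertBy_congrOn {α : Type} (f g : α → α → Bool) (x : α) (acc : List α)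
    (h : ∀ b ∈ acc, f x b = g x b) :
    PySem.List.insertBy f x acc = PySem.List.insertBy g x acc := by
  induction acc with
  | nil => rfl
  | cons y ys ih =>
    simp only [PySem.List.insertBy, h y (List.mem_cons_self ..)]
    split
    · rfl
    · simp only [List.cons.injEq, true_and]
      exact ih (fun b hb => h b (List.mem_cons_of_mem _ hb))

lemma pv_foldl_insertBy_congrOn {α : Type} (f g : α → α → Bool) (l acc : List α)
    (h1 : ∀ a ∈ l, ∀ b ∈ acc, f a b = g a b) (h2 : ∀ a ∈ l, ∀ b ∈ l, f a b = g a b) :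
    l.foldl (fun acc x => PySem.List.insertBy f x acc) acc
      = l.foldl (fun acc x => PySem.List.insertBy g x acc) acc := by
  induction l generalizing acc with
  | nil => rfl
  | cons x xs ih =>
    simp only [List.foldl_cons]
    rw [pv_insertBy_congrOn f g x acc (h1 x (List.mem_cons_self ..))]
    have h2' : ∀ a ∈ xs, ∀ b ∈ xs, f a b = g a b :=
      fun a ha b hb => h2 a (List.mem_cons_of_mem _ ha) b (List.mem_cons_of_mem _ hb)
    have h1' : ∀ a ∈ xs, ∀ b ∈ PySem.List.insertBy g x acc, f a b = g a b := by
      intro a ha b hb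
      rcases (PySem.List.mem_insertBy g x b acc).1 hb with hbx | hba
      · subst hbx
        exact h2 a (List.mem_cons_of_mem _ ha) b (List.mem_cons_self ..)
      · exact h1 a (List.mem_cons_of_mem _ ha) b hba
    exact ih _ h1' h2'

-- sorted(pairs) = sorted(pairs, key=fst) when the fst components are pairwise distinct
lemma pv_sorted2_eq_sorted_fst (xs : List (String × List String))
    (hnd : (xs.map Prod.fst).Nodup) :
    PySem.List.sorted2 xs (fun p => p.1) (fun p => p.2) false
      = PySem.List.sorted xs (fun p => p.1) false := by
  have hinj := List.inj_on_of_nodup_map hnd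
  simp only [PySem.List.sorted2, PySem.List.sorted, if_neg (by decide : ¬ (false = true))]
  refine pv_foldl_insertBy_congrOn _ _ xs [] (by simp) (fun a ha b hb => ?_)
  rcases lt_trichotomy a.1 b.1 with h | h | h
  · simp [h]
  · have : a = b := hinj ha hb h
    subst this
    simp
  · simp [h, not_lt_of_gt h]

-- the grouping dict's items, closed form
lemma pv_items (models : List (List (String × String))) :
    (models.foldl (fun d m => d.modify (pvKey m) [] (fun l => l ++ [pvVal m]))
        (PySem.Dict.empty : PySem.Dict String (List String))).items
      = (PySem.Set.ofList (models.map pvKey)).map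
          (fun k => (k, (models.filter (fun m => pvKey m == k)).map pvVal)) := by
  set d := models.foldl (fun d m => d.modify (pvKey m) [] (fun l => l ++ [pvVal m]))
    (PySem.Dict.empty : PySem.Dict String (List String)) with hd
  have hnd : d.keys.Nodup := by
    rw [hd]
    exact PySem.Dict.nodup_keys_foldl_modify_key models pvKey []
      (fun _ m => (fun l => l ++ [pvVal m])) PySem.Dict.empty (by simp [pysem])
  have hkeys : d.keys = PySem.Set.ofList (models.map pvKey) := by
    rw [hd, PySem.Dict.keys_foldl_modify_key models pvKey []
      (fun _ m => (fun l => l ++ [pvVal m])) PySem.Dict.empty]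
    simp [pysem, PySem.Set.update, PySem.Set.ofList, PySem.Set.empty]
  have hgetD : ∀ k, d.getD k [] = (models.filter (fun m => pvKey m == k)).map pvVal := by
    intro k
    have hpair : d = (models.map (fun m => (pvKey m, pvVal m))).foldl
        (fun d p => d.modify p.1 [] (fun l => l ++ [p.2])) PySem.Dict.empty := by
      rw [hd, List.foldl_map]
    rw [hpair, PySem.Dict.getD_foldl_modify_append]
    simp [List.filter_map, Function.comp_def, List.map_map]
  rw [PySem.Dict.items_eq_map_keys d hnd [], hkeys]
  exact List.map_congr_left (fun k _ => by rw [hgetD k])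

-- ===== VERDICT (by name: the statement is the Claim_ definition above) =====
theorem generate_config_from_models_spec : Claim_equal_generate_config_from_models := by
  intro models _
  unfold Spec_generate_config_from_models generate_config_from_models generate_config_from_models_alt
  by_cases hm : models = []
  · simp [hm]
  · simp only [if_neg hm]
    -- 1. normalise A's dict-building fold
    rw [show (fun (d : PySem.Dict String (List String)) (m : List (String × String)) =>
          (if d.contains ((PySem.Dict.mk m).getD "provider" "unknown") = false
            then d.insert ((PySem.Dict.mk m).getD "provider" "unknown") ([] : List String) else d).modify
            ((PySem.Dict.mk m).getD "provider" "unknown") []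
            (fun l => l ++ [(PySem.Dict.mk m).getD "model" ""]))
        = (fun d m => d.modify (pvKey m) [] (fun l => l ++ [pvVal m])) from
      funext fun d => funext fun m => pv_step_eq d (pvKey m) (pvVal m)]
    -- 2. the dict's items in closed form
    rw [pv_items models]
    -- 3. sorted2 over the items = map of sorted distinct providers
    set S := PySem.Set.ofList (models.map pvKey) with hS
    set g := fun k => (k, (models.filter (fun m => pvKey m == k)).map pvVal) with hg
    have hnd : ((S.map g).map Prod.fst).Nodup := by
      have hfst : (S.map g).map Prod.fst = S := by simp [hg, Function.comp_def]
      rw [hfst, hS]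
      exact PySem.Set.nodup_ofList (models.map pvKey)
    rw [pv_sorted2_eq_sorted_fst (S.map g) hnd]
    have hsorted : PySem.List.sorted (S.map g) (fun p => p.1) false
        = (PySem.List.sorted S (fun p => p) false).map g := by
      refine PySem.List.sorted_eq_of_perm_of_pairwise_lt _ _ _
        (List.Perm.map g (PySem.List.sorted_perm S _ _)) ?_
      have := PySem.List.sorted_ofList_pairwise_lt (models.map pvKey)
      rw [← hS] at this
      exact (List.pairwise_map).2 (by simpa [hg] using this)
    rw [hsorted, List.foldl_map]
    have hKfun : pvKey = fun m => (PySem.Dict.mk m).getD "provider" "unknown" := rfl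
    have hVfun : pvVal = fun m => (PySem.Dict.mk m).getD "model" "" := rfl
    simp [hS, hg, hKfun, hVfun, List.append_assoc]
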